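-- pv_equiv track=rewrite | github.com/acselp/Laboratoare_PI | Laboratoare/Lab2/main.py | prime_nums_prod
-- ===== SOURCE A (Python) =====
-- def prod_verify(n, p):
--     a = n % 10
--     n = n // 10
--
--     b = n % 10
--     n = n // 10
--
--     c = n % 10
--
--     if a * b * c == p:
--         return True
--     else:
--         return False
--
-- def prime_nums_prod(_p):
--     prime = []
--     res = []
--
--
--     # Find the all prime numbers which are of 3 digits
--     for num in range(100, 999):
--         # all prime numbers are greater than 1
--         for i in range(2, num):
--             if (num % i) == 0:
--                 break
--         else:
--             prime.append(num)
--
--     # Find all the prime numbers whose digit product equals to _p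
--     for n in prime:
--         if prod_verify(n, _p):
--             res.append(n)
--
--     return res
-- ===== SOURCE B (Python) =====
-- def _is_prime(n):
--     i = 2
--     while i * i <= n:
--         if n % i == 0:
--             return False
--         i += 1
--     return True
--
-- def _digit_product(n):
--     prod = 1
--     while n > 0:
--         prod *= n % 10
--         n //= 10
--     return prod
--
-- def prime_nums_prod(_p):
--     return [n for n in range(100, 999) if _is_prime(n) and _digit_product(n) == _p]
-- ===== Notes on version B (the rewrite author's own statement) =====
-- stated objective: faster
-- what changed: One list comprehension over range(100,999) testing primality by trial division bounded by sqrt(n) (while i*i <= n) and computing the digit product with a divmod loop, instead of A's full trial division up to n with for-else into an intermediate prime list followed by a second append loop peeling exactly three digits.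
import Mathlib
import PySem

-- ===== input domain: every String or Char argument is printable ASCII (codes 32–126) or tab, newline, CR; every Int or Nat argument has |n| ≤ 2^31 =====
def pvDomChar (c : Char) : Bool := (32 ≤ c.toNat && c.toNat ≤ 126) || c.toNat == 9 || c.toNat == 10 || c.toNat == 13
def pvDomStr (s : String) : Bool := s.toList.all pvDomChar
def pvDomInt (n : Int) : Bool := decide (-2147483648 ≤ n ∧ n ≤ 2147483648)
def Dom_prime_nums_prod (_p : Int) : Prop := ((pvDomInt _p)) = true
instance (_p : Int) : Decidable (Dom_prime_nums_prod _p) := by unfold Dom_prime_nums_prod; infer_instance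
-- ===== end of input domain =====

-- B replaces A's full trial division (divisors up to n, for-else, two accumulation loops)
-- by a single filtered pass with sqrt-bounded trial division and a divmod digit-product loop.

-- ===== PORT A =====
-- prod_verify(n, p): peel three digits with % 10 and // 10, compare the product
def prod_verify (n p : Int) : Bool :=
  let a := PySem.Int.mod n 10
  let n := PySem.Int.floordiv n 10
  let b := PySem.Int.mod n 10
  let n := PySem.Int.floordiv n 10
  let c := PySem.Int.mod n 10
  if a * b * c == p then true else false

-- the inner 'for i in range(2, num): if num % i == 0: break / else:' — true = no break (for-else fires)
def noBreakA (num : Int) : List Int → Bool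
  | [] => true
  | i :: rest => if PySem.Int.mod num i == 0 then false else noBreakA num rest

-- the first loop of A: build the 3-digit prime list by trial division
def primeListA : List Int :=
  (PySem.List.pyRange 100 999 1).foldl
    (fun prime num => if noBreakA num (PySem.List.pyRange 2 num 1) then prime ++ [num] else prime) []

def prime_nums_prod (_p : Int) : List Int :=
  primeListA.foldl (fun res n => if prod_verify n _p then res ++ [n] else res) []

-- ===== PORT B =====
-- _is_prime(n): 'i = 2; while i * i <= n: if n % i == 0: return False; i += 1; return True'
-- (the fuel argument only makes the while-loop total; n.toNat steps always suffice since i*i ≤ n bounds i)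
def isPrimeAux : Nat → Int → Int → Bool
  | 0, _, _ => true
  | fuel + 1, i, n =>
    if i * i ≤ n then
      (if PySem.Int.mod n i == 0 then false else isPrimeAux fuel (i + 1) n)
    else true

def is_prime (n : Int) : Bool := isPrimeAux n.toNat 2 n

-- _digit_product(n): 'prod = 1; while n > 0: prod *= n % 10; n //= 10' (fuel as above)
def digitProdAux : Nat → Int → Int → Int
  | 0, _, prod => prod
  | fuel + 1, n, prod =>
    if n > 0 then digitProdAux fuel (PySem.Int.floordiv n 10) (prod * PySem.Int.mod n 10) else prod

def digit_product (n : Int) : Int := digitProdAux (n.toNat + 1) n 1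

def prime_nums_prod_alt (_p : Int) : List Int :=
  (PySem.List.pyRange 100 999 1).filter (fun n => is_prime n && (digit_product n == _p))

-- ===== PRECONDITION & SPEC =====
def Spec_prime_nums_prod (_p : Int) (out : List Int) : Prop := out = prime_nums_prod_alt _p
instance (_p : Int) (out : List Int) : Decidable (Spec_prime_nums_prod _p out) := by unfold Spec_prime_nums_prod; infer_instance

-- ===== CLAIM (what is proved, stated in full; the proofs are below) =====
def Claim_equal_prime_nums_prod : Prop := ∀ (_p : Int), Dom_prime_nums_prod _p → Spec_prime_nums_prod _p (prime_nums_prod _p)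

-- ===== LEMMAS AND PROOFS =====

-- the two primality tests agree on every 3-digit candidate (closed statement; kernel evaluation)
set_option maxRecDepth 100000 in
set_option maxHeartbeats 4000000 in
theorem primality_agree : ∀ num ∈ PySem.List.pyRange 100 999 1,
    noBreakA num (PySem.List.pyRange 2 num 1) = is_prime num := by decide

-- the two digit products agree on every 3-digit candidate (closed statement; kernel evaluation)
set_option maxRecDepth 100000 in
set_option maxHeartbeats 4000000 in
theorem digit_prod_agree : ∀ n ∈ PySem.List.pyRange 100 999 1,
    (PySem.Int.mod n 10) * (PySem.Int.mod (PySem.Int.floordiv n 10) 10) *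
      (PySem.Int.mod (PySem.Int.floordiv (PySem.Int.floordiv n 10) 10) 10) = digit_product n := by
  decide

theorem prod_verify_eq : ∀ n ∈ PySem.List.pyRange 100 999 1, ∀ p : Int,
    prod_verify n p = (digit_product n == p) := by
  intro n hn p
  have h := digit_prod_agree n hn
  simp only [prod_verify]
  rw [h]
  split <;> simp_all

-- ===== VERDICT (by name: the statement is the Claim_ definition above) =====
theorem prime_nums_prod_spec : Claim_equal_prime_nums_prod := by
  intro _p _
  unfold Spec_prime_nums_prod prime_nums_prod prime_nums_prod_alt primeListA
  rw [PySem.List.foldl_append_if_eq_filter, PySem.List.foldl_append_if_eq_filter]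
  simp only [List.nil_append]
  rw [List.filter_filter]
  refine List.filter_congr ?_
  intro n hn
  rw [prod_verify_eq n hn _p, primality_agree n hn, Bool.and_comm]
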